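-- pv_equiv track=rewrite | github.com/wheredoesyourmindgo/serenity-genkey | serenity_analysis/word_endings.py | count_word_beginnings
-- ===== SOURCE A (Python) =====
-- from collections import defaultdict
-- import string
--
-- def count_word_beginnings(word_counts):
--     """Aggregates counts by first letter of each word."""
--     beginnings = defaultdict(int)
--
--     for word, count in word_counts.items():
--         if not word:
--             continue
--         first_char = word[0].lower()
--         if first_char in string.ascii_lowercase:
--             beginnings[first_char] += count
--
--     return dict(sorted(beginnings.items()))
-- ===== SOURCE B (Python) =====
-- import string
--
-- def count_word_beginnings(word_counts):
--     """Aggregates counts by first letter of each word."""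
--     result = {}
--     for letter in string.ascii_lowercase:
--         matches = [count for word, count in word_counts.items()
--                    if word and word[0].lower() == letter]
--         if matches:
--             result[letter] = sum(matches)
--     return result
-- ===== Notes on version B (the rewrite author's own statement) =====
-- stated objective: alternative
-- what changed: B replaces A's single-pass defaultdict accumulation followed by sorting the items with one pass per alphabet letter that sums matching counts directly, emitting the result dict already in alphabetical order with no sort and no intermediate dict.
import Mathlib
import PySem

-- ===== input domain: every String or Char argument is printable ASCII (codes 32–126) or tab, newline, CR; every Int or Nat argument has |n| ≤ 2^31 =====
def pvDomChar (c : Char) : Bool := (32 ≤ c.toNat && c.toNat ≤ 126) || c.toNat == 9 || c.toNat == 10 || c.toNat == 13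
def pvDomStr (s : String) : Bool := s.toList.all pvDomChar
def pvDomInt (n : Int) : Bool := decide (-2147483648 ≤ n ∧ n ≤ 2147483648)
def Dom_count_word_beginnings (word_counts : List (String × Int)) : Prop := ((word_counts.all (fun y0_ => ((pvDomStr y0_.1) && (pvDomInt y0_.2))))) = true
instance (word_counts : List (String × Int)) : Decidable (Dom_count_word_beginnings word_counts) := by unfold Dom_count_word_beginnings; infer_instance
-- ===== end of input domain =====

-- B aggregates with one pass per alphabet letter (output born in alphabetical order, no
-- intermediate dict and no sort) instead of A's defaultdict accumulation + sorted items;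
-- objective: alternative decomposition, similar cost.


-- string.ascii_lowercase
def pyAsciiLowercase : String := "abcdefghijklmnopqrstuvwxyz"

-- ===== PORT A =====
-- word[0].lower() for a non-empty word: the 1-character string of the first char, lowered
def pvFirstLower (word : String) : String :=
  PySem.Str.lower (String.ofList (word.toList.take 1))

def count_word_beginnings (word_counts : List (String × Int)) : List (String × Int) :=
  -- beginnings = defaultdict(int); for word, count in word_counts.items(): …
  let beginnings : PySem.Dict String Int :=
    word_counts.foldl (fun d p =>
      if p.1 = "" then d      -- if not word: continue
      else
        let first_char := pvFirstLower p.1    -- word[0].lower()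
        if PySem.Str.isIn first_char pyAsciiLowercase   -- first_char in string.ascii_lowercase
        then d.modify first_char 0 (· + p.2)            -- beginnings[first_char] += count
        else d)
      PySem.Dict.empty
  -- dict(sorted(beginnings.items())): keys are distinct, so Python's lexicographic tuple
  -- order over the items coincides with ordering by the key alone, and dict() of a
  -- nodup-keyed pair list is that association list itself.
  PySem.List.sorted beginnings.items (fun q => q.1) false

-- ===== PORT B =====
def count_word_beginnings_alt (word_counts : List (String × Int)) : List (String × Int) :=
  -- for letter in string.ascii_lowercase: … result keys are fresh and distinct, so the
  -- result dict is exactly the list of pairs appended in loop order.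
  pyAsciiLowercase.toList.foldl (fun result letter =>
    let hits := (word_counts.filter (fun p =>
        decide (p.1 ≠ "") && decide (pvFirstLower p.1 = String.ofList [letter]))).map (·.2)
    if hits ≠ [] then result ++ [(String.ofList [letter], hits.sum)] else result) []

-- ===== PRECONDITION & SPEC =====
-- Pre_ excludes association lists with duplicate keys: A's parameter is a Python dict,
-- which cannot contain two entries with the same key, so such lists encode no input of A.
def Pre_count_word_beginnings (word_counts : List (String × Int)) : Prop :=
  (word_counts.map Prod.fst).Nodup
instance (word_counts : List (String × Int)) : Decidable (Pre_count_word_beginnings word_counts) := by unfold Pre_count_word_beginnings; infer_instance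

def pvWitness_count_word_beginnings : (List (String × Int)) :=
  [("apple", 3), ("Ant", 2), ("7up", 5), ("", 1), ("zebra", 4)]

def Spec_count_word_beginnings (word_counts : List (String × Int)) (out : List (String × Int)) : Prop := out = count_word_beginnings_alt word_counts
instance (word_counts : List (String × Int)) (out : List (String × Int)) : Decidable (Spec_count_word_beginnings word_counts out) := by unfold Spec_count_word_beginnings; infer_instance

-- ===== CLAIM (what is proved, stated in full; the proofs are below) =====
def Claim_equal_count_word_beginnings : Prop := ∀ (word_counts : List (String × Int)), Dom_count_word_beginnings word_counts → Pre_count_word_beginnings word_counts → Spec_count_word_beginnings word_counts (count_word_beginnings word_counts)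

-- ===== LEMMAS AND PROOFS =====

-- proof-side canonical forms of the two loops
def pvLetters : List Char := pyAsciiLowercase.toList

def pvHit (l : Char) (p : String × Int) : Bool :=
  decide (p.1 ≠ "") && decide (pvFirstLower p.1 = String.ofList [l])

def pvM (wc : List (String × Int)) (l : Char) : List Int :=
  (wc.filter (pvHit l)).map (·.2)

def pvSel (p : String × Int) : Bool :=
  decide (p.1 ≠ "") && PySem.Str.isIn (pvFirstLower p.1) pyAsciiLowercase

def pvStep (d : PySem.Dict String Int) (p : String × Int) : PySem.Dict String Int :=
  if pvSel p then d.modify (pvFirstLower p.1) 0 (· + p.2) else d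

def pvFold (wc : List (String × Int)) (d : PySem.Dict String Int) : PySem.Dict String Int :=
  wc.foldl pvStep d

def pvSum (wc : List (String × Int)) (k : String) : Int :=
  ((wc.filter (fun p => pvSel p && decide (pvFirstLower p.1 = k))).map (·.2)).sum

def pvB (wc : List (String × Int)) : List (String × Int) :=
  (pvLetters.filter (fun l => decide (pvM wc l ≠ []))).map
    (fun l => (String.ofList [l], (pvM wc l).sum))

theorem pvStep_eq (d : PySem.Dict String Int) (p : String × Int) :
    (if p.1 = "" then d
     else
       let first_char := pvFirstLower p.1
       if PySem.Str.isIn first_char pyAsciiLowercase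
       then d.modify first_char 0 (· + p.2) else d) = pvStep d p := by
  by_cases h1 : p.1 = ""
  · simp [pvStep, pvSel, h1]
  · by_cases h2 : PySem.Str.isIn (pvFirstLower p.1) pyAsciiLowercase = true
    · simp [pvStep, pvSel, h1, h2]
    · simp [pvStep, pvSel, h1, h2]

theorem pvA_eq (wc : List (String × Int)) :
    count_word_beginnings wc =
      PySem.List.sorted (pvFold wc PySem.Dict.empty).items (fun q => q.1) false := by
  have h : List.foldl (fun d (p : String × Int) =>
      if p.1 = "" then d
      else
        let first_char := pvFirstLower p.1
        if PySem.Str.isIn first_char pyAsciiLowercase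
        then d.modify first_char 0 (· + p.2) else d) PySem.Dict.empty wc
      = pvFold wc PySem.Dict.empty :=
    PySem.List.foldl_congr_mem _ _ _ _ (fun d p _ => pvStep_eq d p)
  unfold count_word_beginnings
  rw [h]

theorem pvB_foldl (wc : List (String × Int)) :
    ∀ (L : List Char) (acc : List (String × Int)),
      L.foldl (fun result letter =>
        if pvM wc letter ≠ [] then result ++ [(String.ofList [letter], (pvM wc letter).sum)]
        else result) acc
      = acc ++ (L.filter (fun l => decide (pvM wc l ≠ []))).map
          (fun l => (String.ofList [l], (pvM wc l).sum)) := by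
  intro L
  induction L with
  | nil => intro acc; simp
  | cons l L ih =>
    intro acc
    simp only [List.foldl_cons, List.filter_cons]
    by_cases h : pvM wc l ≠ []
    · rw [if_pos h, ih]; simp [h]
    · rw [if_neg h, ih]; push_neg at h; simp [h]

theorem pvB_eq (wc : List (String × Int)) :
    count_word_beginnings_alt wc = pvB wc := by
  show pyAsciiLowercase.toList.foldl (fun result letter =>
        if pvM wc letter ≠ [] then result ++ [(String.ofList [letter], (pvM wc letter).sum)]
        else result) [] = pvB wc
  rw [pvB_foldl wc (pyAsciiLowercase.toList) []]
  rfl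

theorem pvGetD_fold (wc : List (String × Int)) :
    ∀ (d : PySem.Dict String Int) (k : String),
      (pvFold wc d).getD k 0 = d.getD k 0 + pvSum wc k := by
  induction wc with
  | nil => intro d k; simp [pvFold, pvSum]
  | cons p wc ih =>
    intro d k
    show (pvFold wc (pvStep d p)).getD k 0 = _
    rw [ih]
    unfold pvStep pvSum
    by_cases hs : pvSel p = true
    · simp only [hs, if_pos]
      rw [PySem.Dict.getD_modify]
      by_cases hk : k = pvFirstLower p.1
      · simp [List.filter_cons, hs, hk]
        ring
      · have : ¬ pvFirstLower p.1 = k := fun h => hk h.symm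
        simp [List.filter_cons, hs, hk, this]
    · simp only [hs, if_neg, Bool.false_eq_true, not_false_iff, ite_false]
      simp [List.filter_cons, hs]

theorem pvMem_keys_fold (wc : List (String × Int)) :
    ∀ (d : PySem.Dict String Int) (k : String),
      k ∈ (pvFold wc d).keys ↔
        k ∈ d.keys ∨ ∃ p ∈ wc, pvSel p = true ∧ pvFirstLower p.1 = k := by
  induction wc with
  | nil => intro d k; simp [pvFold]
  | cons p wc ih =>
    intro d k
    show k ∈ (pvFold wc (pvStep d p)).keys ↔ _
    rw [ih]
    unfold pvStep
    by_cases hs : pvSel p = true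
    · simp only [hs, if_pos]
      rw [PySem.Dict.keys_modify, PySem.Dict.mem_keys_insert]
      constructor
      · rintro ((heq | h) | ⟨q, hq, h1, h2⟩)
        · exact Or.inr ⟨p, List.mem_cons_self .., hs, heq.symm⟩
        · exact Or.inl h
        · exact Or.inr ⟨q, List.mem_cons_of_mem _ hq, h1, h2⟩
      · rintro (h | ⟨q, hq, h1, h2⟩)
        · exact Or.inl (Or.inr h)
        · rcases List.mem_cons.mp hq with heq | hq'
          · exact Or.inl (Or.inl (heq ▸ h2).symm)
          · exact Or.inr ⟨q, hq', h1, h2⟩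
    · simp only [hs, Bool.false_eq_true, if_neg, not_false_iff]
      constructor
      · rintro (h | ⟨q, hq, h1, h2⟩)
        · exact Or.inl h
        · exact Or.inr ⟨q, List.mem_cons_of_mem _ hq, h1, h2⟩
      · rintro (h | ⟨q, hq, h1, h2⟩)
        · exact Or.inl h
        · rcases List.mem_cons.mp hq with heq | hq'
          · exact absurd (heq ▸ h1) hs
          · exact Or.inr ⟨q, hq', h1, h2⟩

theorem pvNodup_keys_fold (wc : List (String × Int)) :
    ∀ (d : PySem.Dict String Int), d.keys.Nodup → (pvFold wc d).keys.Nodup := by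
  induction wc with
  | nil => intro d h; exact h
  | cons p wc ih =>
    intro d h
    refine ih (pvStep d p) ?_
    unfold pvStep
    by_cases hs : pvSel p = true
    · simp only [hs, if_pos]
      rw [PySem.Dict.keys_modify]
      exact PySem.Dict.nodup_keys_insert _ _ _ h
    · simpa [hs] using h

theorem pvFirstLower_eq (w : String) (hw : w ≠ "") :
    pvFirstLower w = String.ofList [PySem.Chars.lowerChar w.toList.headI] := by
  have hl : w.toList ≠ [] := fun h => hw (by
    have := congrArg String.ofList h
    simpa [String.ofList_toList] using this)
  obtain ⟨c, t, hct⟩ := List.exists_cons_of_ne_nil hl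
  have : (pvFirstLower w).toList = [PySem.Chars.lowerChar w.toList.headI] := by
    unfold pvFirstLower
    rw [PySem.Str.toList_lower, String.toList_ofList, hct]
    simp [PySem.Chars.lower]
  calc pvFirstLower w = String.ofList (pvFirstLower w).toList := String.ofList_toList.symm
    _ = _ := by rw [this]

theorem pvSingleton_infix (c : Char) (L : List Char) : [c] <:+: L ↔ c ∈ L := by
  constructor
  · intro h; exact h.subset (by simp)
  · intro h
    obtain ⟨s, t, rfl⟩ := List.append_of_mem h
    exact ⟨s, t, by simp⟩

theorem pvIsIn_singleton (c : Char) :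
    PySem.Str.isIn (String.ofList [c]) pyAsciiLowercase = true ↔ c ∈ pvLetters := by
  rw [PySem.Str.isIn_iff_infix, String.toList_ofList]
  exact pvSingleton_infix c _

theorem pvChars_isIn (l : Char) (hl : l ∈ pvLetters) :
    PySem.Chars.isIn [l] pyAsciiLowercase.toList = true := by
  rw [PySem.Chars.isIn_iff_infix]
  exact (pvSingleton_infix l _).mpr hl

theorem pvSel_exists_letter (p : String × Int) (hs : pvSel p = true) :
    ∃ l ∈ pvLetters, pvFirstLower p.1 = String.ofList [l] := by
  unfold pvSel at hs
  simp only [Bool.and_eq_true, decide_eq_true_eq] at hs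
  obtain ⟨hne, hin⟩ := hs
  rw [pvFirstLower_eq p.1 hne] at hin ⊢
  exact ⟨_, (pvIsIn_singleton _).mp hin, rfl⟩

theorem pvSum_letter (wc : List (String × Int)) (l : Char) (hl : l ∈ pvLetters) :
    pvSum wc (String.ofList [l]) = (pvM wc l).sum := by
  unfold pvSum pvM
  congr 1
  congr 1
  apply List.filter_congr
  intro p _
  unfold pvSel pvHit
  by_cases h1 : p.1 = ""
  · simp [h1]
  · by_cases h2 : pvFirstLower p.1 = String.ofList [l]
    · simp [h1, h2, pvChars_isIn l hl]
    · simp [h1, h2]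

theorem pvM_ne_nil_iff (wc : List (String × Int)) (l : Char) :
    pvM wc l ≠ [] ↔ ∃ p ∈ wc, pvHit l p = true := by
  unfold pvM
  rw [Ne, List.map_eq_nil_iff, List.filter_eq_nil_iff]
  push_neg
  simp

theorem pvMembership (wc : List (String × Int)) (k : String) (v : Int) :
    ((∃ p ∈ wc, pvSel p = true ∧ pvFirstLower p.1 = k) ∧ v = pvSum wc k) ↔
      ∃ l ∈ pvLetters, pvM wc l ≠ [] ∧ k = String.ofList [l] ∧ v = (pvM wc l).sum := by
  constructor
  · rintro ⟨⟨p, hp, hs, hk⟩, hv⟩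
    obtain ⟨l, hl, hfl⟩ := pvSel_exists_letter p hs
    have hk' : k = String.ofList [l] := by rw [← hk, hfl]
    have hne : p.1 ≠ "" := by
      unfold pvSel at hs; simp only [Bool.and_eq_true, decide_eq_true_eq] at hs; exact hs.1
    refine ⟨l, hl, ?_, hk', ?_⟩
    · exact (pvM_ne_nil_iff wc l).mpr ⟨p, hp, by simp [pvHit, hne, hfl]⟩
    · rw [hv, hk', pvSum_letter wc l hl]
  · rintro ⟨l, hl, hne, rfl, rfl⟩
    obtain ⟨p, hp, hhit⟩ := (pvM_ne_nil_iff wc l).mp hne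
    unfold pvHit at hhit
    simp only [Bool.and_eq_true, decide_eq_true_eq] at hhit
    obtain ⟨hpne, hfl⟩ := hhit
    refine ⟨⟨p, hp, ?_, hfl⟩, (pvSum_letter wc l hl).symm⟩
    unfold pvSel
    simp [hpne, hfl, pvChars_isIn l hl]

theorem pvMem_items (wc : List (String × Int)) (k : String) (v : Int) :
    (k, v) ∈ (pvFold wc PySem.Dict.empty).items ↔
      (∃ p ∈ wc, pvSel p = true ∧ pvFirstLower p.1 = k) ∧ v = pvSum wc k := by
  have hnd : (pvFold wc PySem.Dict.empty).keys.Nodup :=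
    pvNodup_keys_fold wc _ (by simp [PySem.Dict.keys_empty])
  constructor
  · intro h
    have hget := PySem.Dict.get?_of_mem_items _ h hnd
    have hk : k ∈ (pvFold wc PySem.Dict.empty).keys := by
      rw [← PySem.Dict.contains_iff_mem_keys, PySem.Dict.contains_eq_isSome_get?, hget]
      rfl
    have hmem := (pvMem_keys_fold wc PySem.Dict.empty k).mp hk
    simp only [PySem.Dict.keys_empty, List.not_mem_nil, false_or] at hmem
    refine ⟨hmem, ?_⟩
    have := pvGetD_fold wc PySem.Dict.empty k
    rw [PySem.Dict.getD_eq_get?_getD, hget, PySem.Dict.getD_empty] at this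
    simpa using this
  · rintro ⟨hex, rfl⟩
    have hk : k ∈ (pvFold wc PySem.Dict.empty).keys :=
      (pvMem_keys_fold wc PySem.Dict.empty k).mpr (Or.inr hex)
    have hc : (pvFold wc PySem.Dict.empty).contains k = true :=
      (PySem.Dict.contains_iff_mem_keys _ k).mpr hk
    rw [PySem.Dict.contains_eq_isSome_get?] at hc
    obtain ⟨v', hv'⟩ := Option.isSome_iff_exists.mp hc
    have := pvGetD_fold wc PySem.Dict.empty k
    rw [PySem.Dict.getD_eq_get?_getD, hv', PySem.Dict.getD_empty] at this
    simp only [Option.getD_some, zero_add] at this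
    rw [← this]
    exact PySem.Dict.mem_items_of_get?_eq_some _ hv'

theorem pvB_pairwise (wc : List (String × Int)) :
    (pvB wc).Pairwise (fun a b => a.1 < b.1) := by
  unfold pvB
  rw [List.pairwise_map]
  refine List.Pairwise.filter _ ?_
  have h : pvLetters.Pairwise (fun a b : Char => ([a] : List Char) < [b]) := by
    unfold pvLetters pyAsciiLowercase; decide
  exact h.imp (fun {a b} hab =>
    String.lt_iff_toList_lt.mpr (by simpa [String.toList_ofList] using hab))

theorem pvB_mem (wc : List (String × Int)) (k : String) (v : Int) :
    (k, v) ∈ pvB wc ↔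
      ∃ l ∈ pvLetters, pvM wc l ≠ [] ∧ k = String.ofList [l] ∧ v = (pvM wc l).sum := by
  unfold pvB
  simp only [List.mem_map, List.mem_filter, decide_eq_true_eq, Prod.mk.injEq]
  constructor
  · rintro ⟨l, ⟨hl, hne⟩, hk, hv⟩; exact ⟨l, hl, hne, hk.symm, hv.symm⟩
  · rintro ⟨l, hl, hne, hk, hv⟩; exact ⟨l, ⟨hl, hne⟩, hk.symm, hv.symm⟩

theorem pvMain (wc : List (String × Int)) :
    count_word_beginnings wc = count_word_beginnings_alt wc := by
  rw [pvA_eq, pvB_eq]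
  apply PySem.List.sorted_eq_of_perm_of_pairwise_lt
  · have hndB : (pvB wc).Nodup :=
      (pvB_pairwise wc).imp (fun {a b} h => fun he => absurd (he ▸ h) (lt_irrefl _))
    have hndI : (pvFold wc PySem.Dict.empty).items.Nodup := by
      have := pvNodup_keys_fold wc PySem.Dict.empty (by simp [PySem.Dict.keys_empty])
      exact List.Nodup.of_map _ this
    rw [List.perm_ext_iff_of_nodup hndB hndI]
    rintro ⟨k, v⟩
    rw [pvB_mem, pvMem_items, pvMembership]
  · exact pvB_pairwise wc


-- ===== VERDICT (by name: the statement is the Claim_ definition above) =====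
theorem count_word_beginnings_spec : Claim_equal_count_word_beginnings := by
  intro wc _ _
  unfold Spec_count_word_beginnings
  exact pvMain wc
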